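-- pv_equiv track=rewrite | github.com/eleanor-project/V8 | api/rest/services/config_proposals.py | _infer_reason_codes
-- ===== SOURCE A (Python) =====
-- from typing import Any, Dict, Iterable, List, Optional, Tuple
--
-- def _infer_reason_codes(changed_keys: List[str]) -> List[str]:
--     reasons: List[str] = []
--     for key in changed_keys:
--         lowered = key.lower()
--         if "opa" in lowered or "policy" in lowered:
--             reasons.append("OPA_POLICY_CHANGED")
--         if "precedent" in lowered:
--             reasons.append("PRECEDENT_SUPERSEDED")
--         if "risk" in lowered or "threshold" in lowered:
--             reasons.append("RISK_THRESHOLD_EXCEEDED")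
--     return sorted(set(reasons))
-- ===== SOURCE B (Python) =====
-- RULES = [
--     ("OPA_POLICY_CHANGED", ("opa", "policy")),
--     ("PRECEDENT_SUPERSEDED", ("precedent",)),
--     ("RISK_THRESHOLD_EXCEEDED", ("risk", "threshold")),
-- ]
--
-- def _infer_reason_codes(changed_keys):
--     lowered = [key.lower() for key in changed_keys]
--     return [code for code, triggers in RULES
--             if any(t in key for key in lowered for t in triggers)]
-- ===== Notes on version B (the rewrite author's own statement) =====
-- stated objective: idiomatic
-- what changed: Replaces the key-major loop with per-key inline branches plus a final sorted(set(...)) by a rule-major scan over an explicit rules table: each code is emitted at most once, and since the table is listed in the codes' alphabetical order the result needs no dedup or sort.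
import Mathlib
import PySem

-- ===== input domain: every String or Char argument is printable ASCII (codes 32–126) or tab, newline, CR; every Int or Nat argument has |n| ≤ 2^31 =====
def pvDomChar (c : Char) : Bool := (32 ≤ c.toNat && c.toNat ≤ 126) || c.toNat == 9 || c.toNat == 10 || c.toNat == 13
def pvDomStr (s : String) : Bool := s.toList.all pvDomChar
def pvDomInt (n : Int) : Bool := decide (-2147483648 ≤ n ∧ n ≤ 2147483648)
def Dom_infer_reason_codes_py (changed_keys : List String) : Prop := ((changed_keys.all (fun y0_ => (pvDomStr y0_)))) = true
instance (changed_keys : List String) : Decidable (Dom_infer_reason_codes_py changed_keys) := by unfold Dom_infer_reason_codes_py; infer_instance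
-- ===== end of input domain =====

-- B replaces A's key-major loop + sorted(set(...)) with a rule-major scan over an
-- explicit rules table listed in alphabetical code order (idiomatic decomposition).


-- ===== PORT A =====
def infer_reason_codes_py (changed_keys : List String) : List String :=
  let reasons : List String := changed_keys.foldl (fun reasons key =>
    let lowered := PySem.Str.lower key
    let reasons := if PySem.Str.isIn "opa" lowered || PySem.Str.isIn "policy" lowered
                   then reasons ++ ["OPA_POLICY_CHANGED"] else reasons
    let reasons := if PySem.Str.isIn "precedent" lowered
                   then reasons ++ ["PRECEDENT_SUPERSEDED"] else reasons
    let reasons := if PySem.Str.isIn "risk" lowered || PySem.Str.isIn "threshold" lowered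
                   then reasons ++ ["RISK_THRESHOLD_EXCEEDED"] else reasons
    reasons) []
  PySem.List.sorted (PySem.Set.ofList reasons) (fun x => x) false

-- ===== PORT B =====
def pvRULES : List (String × List String) :=
  [("OPA_POLICY_CHANGED", ["opa", "policy"]),
   ("PRECEDENT_SUPERSEDED", ["precedent"]),
   ("RISK_THRESHOLD_EXCEEDED", ["risk", "threshold"])]

def infer_reason_codes_py_alt (changed_keys : List String) : List String :=
  let lowered := changed_keys.map PySem.Str.lower
  (pvRULES.filter (fun r => lowered.any (fun key => r.2.any (fun t => PySem.Str.isIn t key)))).map Prod.fst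

-- ===== PRECONDITION & SPEC =====
def Spec_infer_reason_codes_py (changed_keys : List String) (out : List String) : Prop := out = infer_reason_codes_py_alt changed_keys
instance (changed_keys : List String) (out : List String) : Decidable (Spec_infer_reason_codes_py changed_keys out) := by unfold Spec_infer_reason_codes_py; infer_instance

-- ===== CLAIM (what is proved, stated in full; the proofs are below) =====
def Claim_equal_infer_reason_codes_py : Prop := ∀ (changed_keys : List String), Dom_infer_reason_codes_py changed_keys → Spec_infer_reason_codes_py changed_keys (infer_reason_codes_py changed_keys)

-- ===== LEMMAS AND PROOFS =====

-- the three per-key predicates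
def pvQ1 (k : String) : Bool := PySem.Str.isIn "opa" (PySem.Str.lower k) || PySem.Str.isIn "policy" (PySem.Str.lower k)
def pvQ2 (k : String) : Bool := PySem.Str.isIn "precedent" (PySem.Str.lower k)
def pvQ3 (k : String) : Bool := PySem.Str.isIn "risk" (PySem.Str.lower k) || PySem.Str.isIn "threshold" (PySem.Str.lower k)

-- what A appends for one key
def pvD (k : String) : List String :=
  (if pvQ1 k then ["OPA_POLICY_CHANGED"] else []) ++
  (if pvQ2 k then ["PRECEDENT_SUPERSEDED"] else []) ++
  (if pvQ3 k then ["RISK_THRESHOLD_EXCEEDED"] else [])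

-- canonical output from the three global booleans
def pvCanon (b1 b2 b3 : Bool) : List String :=
  (if b1 then ["OPA_POLICY_CHANGED"] else []) ++
  (if b2 then ["PRECEDENT_SUPERSEDED"] else []) ++
  (if b3 then ["RISK_THRESHOLD_EXCEEDED"] else [])

lemma pvA_fold_eq (keys : List String) (acc : List String) :
    keys.foldl (fun reasons key =>
      let lowered := PySem.Str.lower key
      let reasons := if PySem.Str.isIn "opa" lowered || PySem.Str.isIn "policy" lowered
                     then reasons ++ ["OPA_POLICY_CHANGED"] else reasons
      let reasons := if PySem.Str.isIn "precedent" lowered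
                     then reasons ++ ["PRECEDENT_SUPERSEDED"] else reasons
      let reasons := if PySem.Str.isIn "risk" lowered || PySem.Str.isIn "threshold" lowered
                     then reasons ++ ["RISK_THRESHOLD_EXCEEDED"] else reasons
      reasons) acc = acc ++ keys.flatMap pvD := by
  induction keys generalizing acc with
  | nil => simp
  | cons k t ih =>
    simp only [List.foldl_cons, List.flatMap_cons, ih]
    simp only [pvD, pvQ1, pvQ2, pvQ3]
    split_ifs <;> simp

lemma pvAnyLower (f : String → Bool) (keys : List String) :
    (keys.map PySem.Str.lower).any f = keys.any (fun k => f (PySem.Str.lower k)) := by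
  rw [List.any_map]; rfl

lemma pvB_eq_canon (changed_keys : List String) :
    infer_reason_codes_py_alt changed_keys
      = pvCanon (changed_keys.any pvQ1) (changed_keys.any pvQ2) (changed_keys.any pvQ3) := by
  unfold infer_reason_codes_py_alt pvRULES
  simp only [List.filter_cons, List.filter_nil, List.any_cons, List.any_nil, pvAnyLower,
    Bool.or_false]
  have e1 : (changed_keys.any fun k =>
      PySem.Str.isIn "opa" (PySem.Str.lower k) || PySem.Str.isIn "policy" (PySem.Str.lower k))
      = changed_keys.any pvQ1 := rfl
  have e2 : (changed_keys.any fun k => PySem.Str.isIn "precedent" (PySem.Str.lower k))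
      = changed_keys.any pvQ2 := rfl
  have e3 : (changed_keys.any fun k =>
      PySem.Str.isIn "risk" (PySem.Str.lower k) || PySem.Str.isIn "threshold" (PySem.Str.lower k))
      = changed_keys.any pvQ3 := rfl
  rw [e1, e2, e3]
  cases changed_keys.any pvQ1 <;> cases changed_keys.any pvQ2 <;>
    cases changed_keys.any pvQ3 <;> simp [pvCanon]

lemma pv_mem_D (k : String) (x : String) :
    x ∈ pvD k ↔
      (x = "OPA_POLICY_CHANGED" ∧ pvQ1 k = true) ∨
      (x = "PRECEDENT_SUPERSEDED" ∧ pvQ2 k = true) ∨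
      (x = "RISK_THRESHOLD_EXCEEDED" ∧ pvQ3 k = true) := by
  simp only [pvD]
  split_ifs <;> simp_all

lemma pv_mem_flatMap_D (keys : List String) (x : String) :
    x ∈ keys.flatMap pvD ↔
      (x = "OPA_POLICY_CHANGED" ∧ keys.any pvQ1 = true) ∨
      (x = "PRECEDENT_SUPERSEDED" ∧ keys.any pvQ2 = true) ∨
      (x = "RISK_THRESHOLD_EXCEEDED" ∧ keys.any pvQ3 = true) := by
  simp only [List.mem_flatMap, List.any_eq_true, pv_mem_D]
  constructor
  · rintro ⟨k, hk, (⟨rfl, h⟩ | ⟨rfl, h⟩ | ⟨rfl, h⟩)⟩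
    · exact Or.inl ⟨rfl, k, hk, h⟩
    · exact Or.inr (Or.inl ⟨rfl, k, hk, h⟩)
    · exact Or.inr (Or.inr ⟨rfl, k, hk, h⟩)
  · rintro (⟨rfl, k, hk, h⟩ | ⟨rfl, k, hk, h⟩ | ⟨rfl, k, hk, h⟩)
    · exact ⟨k, hk, Or.inl ⟨rfl, h⟩⟩
    · exact ⟨k, hk, Or.inr (Or.inl ⟨rfl, h⟩)⟩
    · exact ⟨k, hk, Or.inr (Or.inr ⟨rfl, h⟩)⟩

lemma pv_canon_nodup (b1 b2 b3 : Bool) : (pvCanon b1 b2 b3).Nodup := by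
  cases b1 <;> cases b2 <;> cases b3 <;> simp [pvCanon]

lemma pv_canon_pairwise (b1 b2 b3 : Bool) :
    (pvCanon b1 b2 b3).Pairwise (fun a b => (fun x : String => x) a < (fun x : String => x) b) := by
  cases b1 <;> cases b2 <;> cases b3 <;> simp [pvCanon] <;> decide

lemma pv_mem_canon (b1 b2 b3 : Bool) (x : String) :
    x ∈ pvCanon b1 b2 b3 ↔
      (x = "OPA_POLICY_CHANGED" ∧ b1 = true) ∨
      (x = "PRECEDENT_SUPERSEDED" ∧ b2 = true) ∨
      (x = "RISK_THRESHOLD_EXCEEDED" ∧ b3 = true) := by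
  cases b1 <;> cases b2 <;> cases b3 <;> simp [pvCanon]

-- ===== VERDICT (by name: the statement is the Claim_ definition above) =====
theorem infer_reason_codes_py_spec : Claim_equal_infer_reason_codes_py := by
  intro changed_keys _
  show infer_reason_codes_py changed_keys = infer_reason_codes_py_alt changed_keys
  rw [pvB_eq_canon]
  simp only [infer_reason_codes_py]
  rw [pvA_fold_eq]
  simp only [List.nil_append]
  apply PySem.List.sorted_eq_of_perm_of_pairwise_lt
  · refine (List.perm_ext_iff_of_nodup (pv_canon_nodup _ _ _) (PySem.Set.nodup_ofList _)).mpr ?_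
    intro x
    rw [pv_mem_canon, PySem.Set.mem_ofList, pv_mem_flatMap_D]
  · exact pv_canon_pairwise _ _ _
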